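-- pv_equiv track=rewrite | github.com/abhiiibabariya-dev/threat-intelligence-blueteam | scripts/email_analyzer.py | check_spf
-- ===== SOURCE A (Python) =====
-- def check_spf(headers: dict) -> dict:
--     """Analyze SPF authentication results."""
--     result = {"status": "not_found", "details": "No SPF record found in headers"}
--     for auth in headers.get('authentication-results', []) + headers.get('received-spf', []):
--         auth_lower = auth.lower()
--         if 'spf=pass' in auth_lower:
--             result = {"status": "pass", "details": auth.strip()}
--         elif 'spf=fail' in auth_lower or 'spf=softfail' in auth_lower:
--             result = {"status": "fail", "details": auth.strip()}
--         elif 'spf=neutral' in auth_lower: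
--             result = {"status": "neutral", "details": auth.strip()}
--     return result
-- ===== SOURCE B (Python) =====
-- def check_spf(headers: dict) -> dict:
--     """Analyze SPF authentication results."""
--     entries = headers.get('authentication-results', []) + headers.get('received-spf', [])
--     for auth in reversed(entries):
--         auth_lower = auth.lower()
--         if 'spf=pass' in auth_lower:
--             return {"status": "pass", "details": auth.strip()}
--         if 'spf=fail' in auth_lower or 'spf=softfail' in auth_lower:
--             return {"status": "fail", "details": auth.strip()}
--         if 'spf=neutral' in auth_lower:
--             return {"status": "neutral", "details": auth.strip()}
--     return {"status": "not_found", "details": "No SPF record found in headers"}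
-- ===== Notes on version B (the rewrite author's own statement) =====
-- stated objective: alternative
-- what changed: Instead of scanning all entries and overwriting a result dict so the last match wins, B iterates the combined list in reverse and returns immediately at the first matching entry (early exit), with the default dict only built when nothing matches.
import Mathlib
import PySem

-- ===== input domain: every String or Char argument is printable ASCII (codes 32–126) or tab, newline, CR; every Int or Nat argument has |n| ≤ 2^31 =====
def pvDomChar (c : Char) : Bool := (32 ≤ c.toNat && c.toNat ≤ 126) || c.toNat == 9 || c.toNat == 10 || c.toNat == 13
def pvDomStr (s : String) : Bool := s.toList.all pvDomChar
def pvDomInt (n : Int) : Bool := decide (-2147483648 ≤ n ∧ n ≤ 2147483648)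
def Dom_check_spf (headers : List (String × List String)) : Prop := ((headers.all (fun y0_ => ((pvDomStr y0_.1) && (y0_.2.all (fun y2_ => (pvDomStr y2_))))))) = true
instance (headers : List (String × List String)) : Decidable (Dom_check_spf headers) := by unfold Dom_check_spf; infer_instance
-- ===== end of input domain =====

-- B is an alternative decomposition: reverse iteration with early return instead of A's
-- full scan that overwrites an accumulator so the last match wins; same cost, same results.

-- ===== PORT A =====
-- A: fold over the combined list, overwriting the result dict on every matching entry.
def check_spf (headers : List (String × List String)) : List (String × String) :=
  ((PySem.Dict.mk headers).getD "authentication-results" [] ++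
   (PySem.Dict.mk headers).getD "received-spf" []).foldl
    (fun result auth =>
      let auth_lower := PySem.Str.lower auth
      if PySem.Str.isIn "spf=pass" auth_lower then
        [("status", "pass"), ("details", PySem.Str.strip auth)]
      else if PySem.Str.isIn "spf=fail" auth_lower || PySem.Str.isIn "spf=softfail" auth_lower then
        [("status", "fail"), ("details", PySem.Str.strip auth)]
      else if PySem.Str.isIn "spf=neutral" auth_lower then
        [("status", "neutral"), ("details", PySem.Str.strip auth)]
      else result)
    [("status", "not_found"), ("details", "No SPF record found in headers")]

-- ===== PORT B =====
-- B: recurse over the reversed list, returning at the first match (early exit).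
def check_spf_go : List String → List (String × String)
  | [] => [("status", "not_found"), ("details", "No SPF record found in headers")]
  | auth :: rest =>
    let auth_lower := PySem.Str.lower auth
    if PySem.Str.isIn "spf=pass" auth_lower then
      [("status", "pass"), ("details", PySem.Str.strip auth)]
    else if PySem.Str.isIn "spf=fail" auth_lower || PySem.Str.isIn "spf=softfail" auth_lower then
      [("status", "fail"), ("details", PySem.Str.strip auth)]
    else if PySem.Str.isIn "spf=neutral" auth_lower then
      [("status", "neutral"), ("details", PySem.Str.strip auth)]
    else check_spf_go rest

def check_spf_alt (headers : List (String × List String)) : List (String × String) :=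
  check_spf_go
    ((PySem.Dict.mk headers).getD "authentication-results" [] ++
     (PySem.Dict.mk headers).getD "received-spf" []).reverse

-- ===== PRECONDITION & SPEC =====
def Spec_check_spf (headers : List (String × List String)) (out : List (String × String)) : Prop := out = check_spf_alt headers
instance (headers : List (String × List String)) (out : List (String × String)) : Decidable (Spec_check_spf headers out) := by unfold Spec_check_spf; infer_instance

-- ===== CLAIM (what is proved, stated in full; the proofs are below) =====
def Claim_equal_check_spf : Prop := ∀ (headers : List (String × List String)), Dom_check_spf headers → Spec_check_spf headers (check_spf headers)

-- ===== LEMMAS AND PROOFS =====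
lemma check_spf_go_reverse (xs : List String) :
    check_spf_go xs.reverse =
      xs.foldl
        (fun result auth =>
          let auth_lower := PySem.Str.lower auth
          if PySem.Str.isIn "spf=pass" auth_lower then
            [("status", "pass"), ("details", PySem.Str.strip auth)]
          else if PySem.Str.isIn "spf=fail" auth_lower || PySem.Str.isIn "spf=softfail" auth_lower then
            [("status", "fail"), ("details", PySem.Str.strip auth)]
          else if PySem.Str.isIn "spf=neutral" auth_lower then
            [("status", "neutral"), ("details", PySem.Str.strip auth)]
          else result)
        [("status", "not_found"), ("details", "No SPF record found in headers")] := by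
  induction xs using List.reverseRecOn with
  | nil => rfl
  | append_singleton xs a ih =>
    rw [List.reverse_append, List.foldl_append]
    simp only [List.reverse_singleton, List.singleton_append, List.foldl_cons, List.foldl_nil,
      check_spf_go]
    split_ifs <;> simp_all

-- ===== VERDICT (by name: the statement is the Claim_ definition above) =====
theorem check_spf_spec : Claim_equal_check_spf := by
  intro headers _
  unfold Spec_check_spf check_spf check_spf_alt
  exact (check_spf_go_reverse _).symm
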